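-- pv_equiv track=rewrite | github.com/liwing1/ED_python | PROJETO/asd.py | separa_carga
-- ===== SOURCE A (Python) =====
-- def wookie_recebe(wk, carga):
--     wk.append(carga)
--     return True
--
-- def wookie_vazio(l_wk):
--     if [] in l_wk:
--         return True
--     return False
--
-- def wookie_menor(carga, wk):
--     if carga <= wk[-1]:
--         return True
--     return False
--
-- def separa_carga(l_wk, l_sobra, l_carga):
--     for carga in l_carga:
--         if wookie_vazio(l_wk):
--             l_wk[l_wk.index([])].append(carga)
--
--         else:
--             for wk in l_wk:
--                 if wookie_menor(carga, wk):
--                     wookie_recebe(wk, carga)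
--                     break
--             else:
--                 wookie_recebe(l_sobra, carga)
--     return l_wk, l_sobra
-- ===== SOURCE B (Python) =====
-- # Segment tree over pile tops: leftmost pile with top >= carga found in O(log k)
-- # instead of A's linear rescan per carga; empty piles served from a precomputed queue.
-- # (Like A, mutates l_wk's inner lists and l_sobra in place via append.)
--
-- def _build(vals):
--     n = len(vals)
--     if n == 1:
--         return (1, vals[0], None, None)
--     mid = n // 2
--     l = _build(vals[:mid])
--     r = _build(vals[mid:])
--     return (n, max(l[1], r[1]), l, r)
--
-- def _update(t, i, v):
--     sz, mx, l, r = t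
--     if sz == 1:
--         return (1, v, None, None)
--     if i < l[0]:
--         l = _update(l, i, v)
--     else:
--         r = _update(r, i - l[0], v)
--     return (sz, max(l[1], r[1]), l, r)
--
-- def _query(t, x):
--     # leftmost index whose value is >= x, or None
--     if t is None or t[1] < x:
--         return None
--     sz, mx, l, r = t
--     if sz == 1:
--         return 0
--     if x <= l[1]:
--         return _query(l, x)
--     return l[0] + _query(r, x)
--
-- def separa_carga(l_wk, l_sobra, l_carga):
--     tops = [wk[-1] if wk else 0 for wk in l_wk]  # 0 is a placeholder, overwritten before any query
--     tree = _build(tops) if tops else None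
--     empties = [i for i, wk in enumerate(l_wk) if not wk]
--     e = 0
--     for carga in l_carga:
--         if e < len(empties):
--             i = empties[e]
--             e += 1
--             l_wk[i].append(carga)
--             tree = _update(tree, i, carga)
--         else:
--             i = _query(tree, carga)
--             if i is None:
--                 l_sobra.append(carga)
--             else:
--                 l_wk[i].append(carga)
--                 tree = _update(tree, i, carga)
--     return l_wk, l_sobra
-- ===== Notes on version B (the rewrite author's own statement) =====
-- stated objective: faster
-- what changed: A rescans all k piles per carga (membership test, list.index and a first-fit scan); B precomputes the empty-pile queue once and keeps a segment tree over pile tops, finding the leftmost pile with top >= carga in O(log k) per carga.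
import Mathlib
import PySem

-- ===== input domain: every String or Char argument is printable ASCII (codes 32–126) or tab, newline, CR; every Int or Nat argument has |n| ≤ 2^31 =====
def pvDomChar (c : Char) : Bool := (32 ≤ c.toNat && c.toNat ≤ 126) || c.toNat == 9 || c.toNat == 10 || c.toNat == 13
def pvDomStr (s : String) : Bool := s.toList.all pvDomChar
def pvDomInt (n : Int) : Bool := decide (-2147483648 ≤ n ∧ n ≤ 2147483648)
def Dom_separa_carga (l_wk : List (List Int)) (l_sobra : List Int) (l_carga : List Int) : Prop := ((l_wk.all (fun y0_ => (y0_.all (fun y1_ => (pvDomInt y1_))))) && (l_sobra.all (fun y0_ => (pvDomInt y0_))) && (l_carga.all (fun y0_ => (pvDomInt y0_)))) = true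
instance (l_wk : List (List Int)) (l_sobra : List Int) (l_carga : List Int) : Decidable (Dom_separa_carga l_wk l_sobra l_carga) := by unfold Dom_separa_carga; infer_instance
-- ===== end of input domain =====

-- B replaces A's per-carga linear rescans by a segment tree over pile tops (leftmost
-- pile with top ≥ carga) plus a precomputed queue of empty piles; return value proved
-- equal (both Pythons mutate l_wk's inner lists and l_sobra in place the same way).

-- ===== PORT A =====
def wookie_recebe (wk : List Int) (carga : Int) : List Int × Bool :=
  (wk ++ [carga], true)

def wookie_vazio (l_wk : List (List Int)) : Bool :=
  if ([] : List Int) ∈ l_wk then true else false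

def wookie_menor (carga : Int) (wk : List Int) : Bool :=
  match PySem.List.pyGet? wk (-1) with
  | some t => if carga ≤ t then true else false
  | none => false   -- wk[-1] IndexError: unreachable, separa_carga only calls this on nonempty wk

-- inner 'for wk in l_wk: … break / else' rebuilt structurally; Bool = "did break"
def sepA_place : List (List Int) → Int → List (List Int) × Bool
  | [], _ => ([], false)
  | wk :: rest, carga =>
    if wookie_menor carga wk then
      ((wookie_recebe wk carga).1 :: rest, (wookie_recebe wk carga).2)
    else
      let p := sepA_place rest carga
      (wk :: p.1, p.2)

def sepA_step (st : List (List Int) × List Int) (carga : Int) : List (List Int) × List Int :=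
  if wookie_vazio st.1 then
    match PySem.List.index? st.1 ([] : List Int) with
    | some i => (st.1.modify i (· ++ [carga]), st.2)   -- l_wk[l_wk.index([])].append(carga)
    | none => st   -- unreachable: wookie_vazio guarantees [] ∈ l_wk
  else
    let p := sepA_place st.1 carga
    if p.2 then (p.1, st.2) else (st.1, (wookie_recebe st.2 carga).1)

def separa_carga (l_wk : List (List Int)) (l_sobra : List Int) (l_carga : List Int) : List (List Int) × List Int :=
  l_carga.foldl sepA_step (l_wk, l_sobra)

-- ===== PORT B =====
-- segment tree node: SegT.node (stored size) (stored max) left right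
inductive SegT where
  | leaf : Int → SegT
  | node : Nat → Int → SegT → SegT → SegT
deriving Repr, DecidableEq

def SegT.size : SegT → Nat
  | .leaf _ => 1
  | .node sz _ _ _ => sz

def SegT.mx : SegT → Int
  | .leaf v => v
  | .node _ m _ _ => m

def stBuild : List Int → SegT
  | [] => .leaf 0   -- unreachable: _build is only called on nonempty lists
  | [v] => .leaf v
  | v :: w :: rest =>
    let l := stBuild ((v :: w :: rest).take ((rest.length + 2) / 2))
    let r := stBuild ((v :: w :: rest).drop ((rest.length + 2) / 2))
    .node (rest.length + 2) (max l.mx r.mx) l r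
termination_by l => l.length
decreasing_by
  all_goals simp [List.length_take, List.length_drop]
  all_goals omega

def stUpdate : SegT → Nat → Int → SegT
  | .leaf _, _, v => .leaf v
  | .node sz _ l r, i, v =>
    if i < l.size then
      let l' := stUpdate l i v
      .node sz (max l'.mx r.mx) l' r
    else
      let r' := stUpdate r (i - l.size) v
      .node sz (max l.mx r'.mx) l r'

-- leftmost index whose value is ≥ x, or none
def stQuery : SegT → Int → Option Nat
  | t, x =>
    if t.mx < x then none
    else
      match t with
      | .leaf _ => some 0
      | .node _ _ l r =>
        if x ≤ l.mx then stQuery l x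
        else (stQuery r x).map (· + l.size)

def stQueryOpt : Option SegT → Int → Option Nat
  | none, _ => none
  | some t, x => stQuery t x

-- [i for i, wk in enumerate(l_wk) if not wk]  (indices are nonnegative, kept as Nat)
def sepB_empties : List (List Int) → Nat → List Nat
  | [], _ => []
  | wk :: rest, i => if wk = [] then i :: sepB_empties rest (i + 1) else sepB_empties rest (i + 1)

def sepB_go (l_carga : List Int) (l_wk : List (List Int)) (l_sobra : List Int)
    (tree : Option SegT) (empties : List Nat) (e : Nat) : List (List Int) × List Int :=
  match l_carga with
  | [] => (l_wk, l_sobra)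
  | carga :: rest =>
    if e < empties.length then
      let i := empties.getD e 0
      sepB_go rest (l_wk.modify i (· ++ [carga])) l_sobra
        (tree.map (fun t => stUpdate t i carga)) empties (e + 1)
    else
      match stQueryOpt tree carga with
      | none => sepB_go rest l_wk (l_sobra ++ [carga]) tree empties e
      | some i => sepB_go rest (l_wk.modify i (· ++ [carga])) l_sobra
          (tree.map (fun t => stUpdate t i carga)) empties e

def separa_carga_alt (l_wk : List (List Int)) (l_sobra : List Int) (l_carga : List Int) : List (List Int) × List Int :=
  let tops := l_wk.map (fun wk => if wk = [] then (0 : Int) else wk.getLastD 0)  -- wk[-1] if wk else 0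
  let tree := if tops = [] then none else some (stBuild tops)
  sepB_go l_carga l_wk l_sobra tree (sepB_empties l_wk 0) 0

-- ===== PRECONDITION & SPEC =====
def Spec_separa_carga (l_wk : List (List Int)) (l_sobra : List Int) (l_carga : List Int) (out : List (List Int) × List Int) : Prop := out = separa_carga_alt l_wk l_sobra l_carga
instance (l_wk : List (List Int)) (l_sobra : List Int) (l_carga : List Int) (out : List (List Int) × List Int) : Decidable (Spec_separa_carga l_wk l_sobra l_carga out) := by unfold Spec_separa_carga; infer_instance

-- ===== CLAIM (what is proved, stated in full; the proofs are below) =====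
def Claim_equal_separa_carga : Prop := ∀ (l_wk : List (List Int)) (l_sobra : List Int) (l_carga : List Int), Dom_separa_carga l_wk l_sobra l_carga → Spec_separa_carga l_wk l_sobra l_carga (separa_carga l_wk l_sobra l_carga)

-- ===== LEMMAS AND PROOFS =====
def pileTop (wk : List Int) : Int := wk.getLastD 0

def SegT.valid : SegT → Prop
  | .leaf _ => True
  | .node sz m l r => sz = l.size + r.size ∧ m = max l.mx r.mx ∧ l.valid ∧ r.valid

def SegT.toList : SegT → List Int
  | .leaf v => [v]
  | .node _ _ l r => l.toList ++ r.toList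

lemma pileTop_if (wk : List Int) : (if wk = [] then (0 : Int) else wk.getLastD 0) = pileTop wk := by
  cases wk <;> simp [pileTop]

@[simp] lemma size_leaf (v : Int) : (SegT.leaf v).size = 1 := rfl
@[simp] lemma size_node (sz : Nat) (m : Int) (l r : SegT) : (SegT.node sz m l r).size = sz := rfl
@[simp] lemma mx_leaf (v : Int) : (SegT.leaf v).mx = v := rfl
@[simp] lemma mx_node (sz : Nat) (m : Int) (l r : SegT) : (SegT.node sz m l r).mx = m := rfl
@[simp] lemma toList_leaf (v : Int) : (SegT.leaf v).toList = [v] := rfl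
@[simp] lemma toList_node (sz : Nat) (m : Int) (l r : SegT) : (SegT.node sz m l r).toList = l.toList ++ r.toList := rfl
lemma valid_node_iff (sz : Nat) (m : Int) (l r : SegT) :
    (SegT.node sz m l r).valid ↔ sz = l.size + r.size ∧ m = max l.mx r.mx ∧ l.valid ∧ r.valid := Iff.rfl

lemma stBuild_spec : ∀ vals : List Int, vals ≠ [] →
    (stBuild vals).valid ∧ (stBuild vals).toList = vals ∧ (stBuild vals).size = vals.length := by
  intro vals
  induction vals using stBuild.induct with
  | case1 => intro h; exact absurd rfl h
  | case2 v => intro _; simp only [stBuild]; exact ⟨trivial, rfl, rfl⟩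
  | case3 v w rest ihl ihr =>
    intro _
    have hmid1 : 1 ≤ (rest.length + 2) / 2 := by omega
    have hmid2 : (rest.length + 2) / 2 < rest.length + 2 := by omega
    have htake : ((v :: w :: rest).take ((rest.length + 2) / 2)) ≠ [] := by
      intro h
      have := congrArg List.length h
      simp [List.length_take] at this
    have hdrop : ((v :: w :: rest).drop ((rest.length + 2) / 2)) ≠ [] := by
      intro h
      have := congrArg List.length h
      simp [List.length_drop] at this
      omega
    obtain ⟨hvl, htl, hsl⟩ := ihl htake
    obtain ⟨hvr, htr, hsr⟩ := ihr hdrop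
    have heq : stBuild (v :: w :: rest) = SegT.node (rest.length + 2)
        (max (stBuild ((v :: w :: rest).take ((rest.length + 2) / 2))).mx
             (stBuild ((v :: w :: rest).drop ((rest.length + 2) / 2))).mx)
        (stBuild ((v :: w :: rest).take ((rest.length + 2) / 2)))
        (stBuild ((v :: w :: rest).drop ((rest.length + 2) / 2))) := by
      rw [stBuild]
    rw [heq]
    refine ⟨(valid_node_iff ..).mpr ⟨?_, rfl, hvl, hvr⟩, ?_, rfl⟩
    · rw [hsl, hsr]
      simp [List.length_take, List.length_drop]
      omega
    · rw [toList_node, htl, htr, List.take_append_drop]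

lemma valid_size : ∀ t : SegT, t.valid → t.size = t.toList.length := by
  intro t
  induction t with
  | leaf v => intro _; rfl
  | node sz m l r ihl ihr =>
    rw [valid_node_iff]
    intro ⟨h1, _, hl, hr⟩
    simp [h1, ihl hl, ihr hr]

lemma valid_le_mx : ∀ t : SegT, t.valid → ∀ a ∈ t.toList, a ≤ t.mx := by
  intro t
  induction t with
  | leaf v => intro _ a ha; simp at ha; simp [ha]
  | node sz m l r ihl ihr =>
    rw [valid_node_iff]
    intro ⟨_, h2, hl, hr⟩ a ha
    rw [toList_node, List.mem_append] at ha
    rw [mx_node, h2]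
    rcases ha with ha | ha
    · exact le_trans (ihl hl a ha) (le_max_left _ _)
    · exact le_trans (ihr hr a ha) (le_max_right _ _)

lemma valid_mx_mem : ∀ t : SegT, t.valid → t.mx ∈ t.toList := by
  intro t
  induction t with
  | leaf v => intro _; simp
  | node sz m l r ihl ihr =>
    rw [valid_node_iff]
    intro ⟨_, h2, hl, hr⟩
    rw [toList_node, List.mem_append, mx_node, h2]
    rcases max_choice l.mx r.mx with h | h <;> rw [h]
    · exact Or.inl (ihl hl)
    · exact Or.inr (ihr hr)

lemma stUpdate_spec : ∀ (t : SegT) (i : Nat) (v : Int), t.valid → i < t.toList.length →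
    (stUpdate t i v).valid ∧ (stUpdate t i v).toList = t.toList.set i v ∧ (stUpdate t i v).size = t.size := by
  intro t
  induction t with
  | leaf w =>
    intro i v _ hi
    simp only [toList_leaf, List.length_singleton] at hi
    have h0 : i = 0 := by omega
    subst h0
    exact ⟨trivial, by simp [stUpdate], rfl⟩
  | node sz m l r ihl ihr =>
    intro i v hv hi
    obtain ⟨h1, _, hl, hr⟩ := (valid_node_iff ..).mp hv
    have hls := valid_size l hl
    have hrs := valid_size r hr
    rw [toList_node, List.length_append] at hi
    by_cases hc : i < l.size
    · obtain ⟨hv', ht', hs'⟩ := ihl i v hl (by omega)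
      simp only [stUpdate, if_pos hc]
      refine ⟨(valid_node_iff ..).mpr ⟨by omega, rfl, hv', hr⟩, ?_, rfl⟩
      rw [toList_node, toList_node, ht', List.set_append, if_pos (by omega)]
    · obtain ⟨hv', ht', hs'⟩ := ihr (i - l.size) v hr (by omega)
      simp only [stUpdate, if_neg hc]
      refine ⟨(valid_node_iff ..).mpr ⟨by omega, rfl, hl, hv'⟩, ?_, rfl⟩
      rw [toList_node, toList_node, ht', List.set_append, if_neg (by omega), hls]

lemma stQuery_spec : ∀ (t : SegT) (x : Int), t.valid →
    stQuery t x = t.toList.findIdx? (fun v => decide (x ≤ v)) := by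
  intro t
  induction t with
  | leaf v =>
    intro x _
    simp only [stQuery, mx_leaf, toList_leaf, List.findIdx?_singleton]
    by_cases h : v < x
    · rw [if_pos h, if_neg (by simpa using not_le.mpr h)]
    · rw [if_neg h, if_pos (by simpa using not_lt.mp h)]
  | node sz m l r ihl ihr =>
    intro x hv
    obtain ⟨h1, h2, hl, hr⟩ := (valid_node_iff ..).mp hv
    have hql := ihl x hl
    have hqr := ihr x hr
    have hls := valid_size l hl
    simp only [stQuery, mx_node, toList_node, List.findIdx?_append]
    by_cases hm : m < x
    · rw [if_pos hm]
      have h3 : l.toList.findIdx? (fun v => decide (x ≤ v)) = none :=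
        List.findIdx?_eq_none_iff.mpr (fun a ha => by
          simp only [decide_eq_false_iff_not, not_le]
          exact lt_of_le_of_lt (le_trans (valid_le_mx l hl a ha) (h2 ▸ le_max_left _ _)) hm)
      have h4 : r.toList.findIdx? (fun v => decide (x ≤ v)) = none :=
        List.findIdx?_eq_none_iff.mpr (fun a ha => by
          simp only [decide_eq_false_iff_not, not_le]
          exact lt_of_le_of_lt (le_trans (valid_le_mx r hr a ha) (h2 ▸ le_max_right _ _)) hm)
      simp [h3, h4]
    · rw [if_neg hm]
      by_cases hxl : x ≤ l.mx
      · rw [if_pos hxl, hql]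
        have hne : l.toList.findIdx? (fun v => decide (x ≤ v)) ≠ none := by
          intro h
          have := List.findIdx?_eq_none_iff.mp h l.mx (valid_mx_mem l hl)
          simp [hxl] at this
        cases hfl : l.toList.findIdx? (fun v => decide (x ≤ v)) with
        | none => exact absurd hfl hne
        | some j => simp
      · rw [if_neg hxl, hqr]
        have h3 : l.toList.findIdx? (fun v => decide (x ≤ v)) = none :=
          List.findIdx?_eq_none_iff.mpr (fun a ha => by
            simp only [decide_eq_false_iff_not, not_le]
            exact lt_of_le_of_lt (valid_le_mx l hl a ha) (not_le.mp hxl))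
        simp [h3, hls]

-- empty-pile indices, relative form used by the proofs
def eIdx : List (List Int) → List Nat
  | [] => []
  | wk :: rest => if wk = [] then 0 :: (eIdx rest).map (· + 1) else (eIdx rest).map (· + 1)

lemma sepB_empties_eq : ∀ (l : List (List Int)) (s : Nat), sepB_empties l s = (eIdx l).map (s + ·) := by
  intro l
  induction l with
  | nil => intro s; rfl
  | cons wk rest ih =>
    intro s
    have hm : ((eIdx rest).map (· + 1)).map (s + ·) = (eIdx rest).map ((s + 1) + ·) := by
      rw [List.map_map]
      apply List.map_congr_left
      intro a _
      simp [Function.comp]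
      omega
    by_cases h : wk = []
    · simp only [sepB_empties, eIdx, if_pos h, List.map_cons, ih (s + 1), hm]
      simp
    · simp only [sepB_empties, eIdx, if_neg h, ih (s + 1), hm]

lemma eIdx_nil_iff : ∀ l : List (List Int), eIdx l = [] ↔ ([] : List Int) ∉ l := by
  intro l
  induction l with
  | nil => simp [eIdx]
  | cons wk rest ih =>
    by_cases h : wk = []
    · rw [eIdx, if_pos h]
      simp [h]
    · rw [eIdx, if_neg h]
      simp only [List.map_eq_nil_iff, ih, List.mem_cons]
      simp [Ne.symm h]

lemma eIdx_head : ∀ (l : List (List Int)) (i : Nat) (rest : List Nat), eIdx l = i :: rest →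
    i < l.length ∧ PySem.List.index? l ([] : List Int) = some i := by
  intro l
  induction l with
  | nil => intro i rest h; simp [eIdx] at h
  | cons wk tail ih =>
    intro i rest h
    by_cases hw : wk = []
    · rw [eIdx, if_pos hw] at h
      obtain ⟨h1, h2⟩ := List.cons.inj h
      subst h1
      constructor
      · simp
      · simp [PySem.List.index?, List.idxOf?_cons, hw]
    · rw [eIdx, if_neg hw] at h
      rw [List.map_eq_cons_iff] at h
      obtain ⟨i', rest', he, hi, hr⟩ := h
      obtain ⟨b1, b2⟩ := ih i' rest' he
      constructor
      · simp; omega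
      · simp only [PySem.List.index?] at b2 ⊢
        rw [List.idxOf?_cons, if_neg (by simpa using Ne.symm hw), b2]
        simp [hi]

lemma eIdx_modify_head : ∀ (l : List (List Int)) (i : Nat) (rest : List Nat) (f : List Int → List Int),
    (∀ wk, f wk ≠ []) → eIdx l = i :: rest → eIdx (l.modify i f) = rest := by
  intro l
  induction l with
  | nil => intro i rest f _ h; simp [eIdx] at h
  | cons wk tail ih =>
    intro i rest f hf h
    by_cases hw : wk = []
    · rw [eIdx, if_pos hw] at h
      obtain ⟨h1, h2⟩ := List.cons.inj h
      subst h1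
      show eIdx (f wk :: tail) = rest
      rw [eIdx, if_neg (hf wk), h2]
    · rw [eIdx, if_neg hw] at h
      rw [List.map_eq_cons_iff] at h
      obtain ⟨i', rest', he, hi, hr⟩ := h
      subst hi
      show eIdx (wk :: tail.modify i' f) = rest
      rw [eIdx, if_neg hw, ih i' rest' f hf he, hr]

lemma eIdx_modify_nil : ∀ (l : List (List Int)) (i : Nat) (f : List Int → List Int),
    (∀ wk, f wk ≠ []) → eIdx l = [] → eIdx (l.modify i f) = [] := by
  intro l
  induction l with
  | nil => intro i f _ _; cases i <;> rfl
  | cons wk tail ih =>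
    intro i f hf h
    rw [eIdx] at h
    by_cases hw : wk = []
    · rw [if_pos hw] at h; simp at h
    · rw [if_neg hw] at h
      rw [List.map_eq_nil_iff] at h
      cases i with
      | zero =>
        show eIdx (f wk :: tail) = []
        rw [eIdx, if_neg (hf wk), h]
        rfl
      | succ n =>
        show eIdx (wk :: tail.modify n f) = []
        rw [eIdx, if_neg hw, ih n f hf h]
        rfl

lemma tops_modify : ∀ (l : List (List Int)) (i : Nat) (c : Int), i < l.length →
    (l.modify i (· ++ [c])).map pileTop = (l.map pileTop).set i c := by
  intro l
  induction l with
  | nil => intro i c h; simp at h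
  | cons wk tail ih =>
    intro i c h
    cases i with
    | zero =>
      show (( wk ++ [c]) :: tail).map pileTop = _
      simp [pileTop]
    | succ n =>
      show (wk :: tail.modify n (· ++ [c])).map pileTop = _
      simp only [List.map_cons, List.set_cons_succ]
      rw [ih n c (by simpa using Nat.lt_of_succ_lt_succ h)]

lemma wookie_menor_eq (carga : Int) (wk : List Int) (h : wk ≠ []) :
    wookie_menor carga wk = decide (carga ≤ pileTop wk) := by
  have hlen : 1 ≤ wk.length := by
    cases wk with
    | nil => exact absurd rfl h
    | cons a t => simp
  have hg : PySem.List.pyGet? wk (-1) = some (wk.getLastD 0) := by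
    simp only [PySem.List.pyGet?, PySem.List.pyIdx?]
    rw [if_neg (by omega), if_pos (by omega)]
    simp only [Option.bind_some]
    rw [show ((-(-1 : Int)).toNat) = 1 from rfl]
    rw [List.getElem?_eq_getElem (by omega)]
    rw [List.getLastD_eq_getLast?, List.getLast?_eq_getElem?, List.getElem?_eq_getElem (by omega)]
    rfl
  rw [wookie_menor, hg]
  by_cases hc : carga ≤ wk.getLastD 0
  · simp [pileTop]
  · simp [pileTop]
lemma sepA_place_eq : ∀ (l : List (List Int)) (carga : Int),
    sepA_place l carga =
      match l.findIdx? (fun wk => wookie_menor carga wk) with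
      | some i => (l.modify i (· ++ [carga]), true)
      | none => (l, false) := by
  intro l carga
  induction l with
  | nil => rfl
  | cons wk rest ih =>
    rw [List.findIdx?_cons]
    by_cases h : wookie_menor carga wk
    · rw [sepA_place, if_pos h, if_pos h]
      rfl
    · rw [sepA_place, if_neg h, if_neg (by simpa using h), ih]
      cases hf : rest.findIdx? (fun wk => wookie_menor carga wk) with
      | none => rfl
      | some j => rfl

lemma findIdx?_congr_mem {α : Type} (l : List α) (p q : α → Bool) (h : ∀ a ∈ l, p a = q a) :
    l.findIdx? p = l.findIdx? q := by
  induction l with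
  | nil => rfl
  | cons a l ih =>
    rw [List.findIdx?_cons, List.findIdx?_cons, h a (by simp),
      ih (fun b hb => h b (List.mem_cons_of_mem _ hb))]

lemma go_main : ∀ (cargas : List Int) (l_wk : List (List Int)) (l_sobra : List Int)
    (tree : Option SegT) (empties : List Nat) (e : Nat),
    (match tree with
     | none => l_wk = []
     | some t => l_wk ≠ [] ∧ t.valid ∧ t.toList = l_wk.map pileTop) →
    empties.drop e = eIdx l_wk →
    List.foldl sepA_step (l_wk, l_sobra) cargas = sepB_go cargas l_wk l_sobra tree empties e := by
  intro cargas
  induction cargas with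
  | nil => intro l_wk l_sobra tree empties e _ _; rfl
  | cons carga rest ih =>
    intro l_wk l_sobra tree empties e htree hemp
    rw [List.foldl_cons, sepB_go]
    have hdlen := congrArg List.length hemp
    rw [List.length_drop] at hdlen
    by_cases hE : eIdx l_wk = []
    · -- no empty pile
      have hnotmem : ([] : List Int) ∉ l_wk := (eIdx_nil_iff l_wk).mp hE
      have hne : ¬ e < empties.length := by
        rw [hE] at hdlen; simp at hdlen; omega
      rw [if_neg hne]
      have hAstep : sepA_step (l_wk, l_sobra) carga =
          (match l_wk.findIdx? (fun wk => wookie_menor carga wk) with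
           | some i => (l_wk.modify i (· ++ [carga]), l_sobra)
           | none => (l_wk, l_sobra ++ [carga])) := by
        rw [sepA_step]
        rw [if_neg (by simp [wookie_vazio, hnotmem])]
        rw [sepA_place_eq]
        cases l_wk.findIdx? (fun wk => wookie_menor carga wk) with
        | none => rfl
        | some i => rfl
      cases tree with
      | none =>
        have h0 : l_wk = [] := htree
        subst h0
        rw [hAstep]
        simp only [List.findIdx?_nil, stQueryOpt]
        exact ih [] (l_sobra ++ [carga]) none empties e rfl hemp
      | some t =>
        obtain ⟨hwne, hv, ht⟩ := htree
        have hq : stQueryOpt (some t) carga = l_wk.findIdx? (fun wk => wookie_menor carga wk) := by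
          rw [stQueryOpt, stQuery_spec t carga hv, ht, List.findIdx?_map]
          apply findIdx?_congr_mem
          intro wk hwk
          have hwkne : wk ≠ [] := fun hh => hnotmem (hh ▸ hwk)
          rw [Function.comp, wookie_menor_eq carga wk hwkne]
        rw [hAstep, hq]
        cases hf : l_wk.findIdx? (fun wk => wookie_menor carga wk) with
        | none => exact ih l_wk (l_sobra ++ [carga]) (some t) empties e ⟨hwne, hv, ht⟩ hemp
        | some i =>
          have hilt : i < l_wk.length := (List.findIdx?_eq_some_iff_findIdx_eq.mp hf).1
          have hilt' : i < t.toList.length := by rw [ht]; simpa using hilt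
          obtain ⟨hv', ht', _⟩ := stUpdate_spec t i carga hv hilt'
          simp only [Option.map_some]
          apply ih
          · refine ⟨?_, hv', ?_⟩
            · have hlm : (l_wk.modify i (· ++ [carga])).length = l_wk.length := by simp
              intro hh
              rw [hh] at hlm
              simp at hlm
              omega
            · rw [ht', ht, tops_modify l_wk i carga hilt]
          · rw [hemp, eIdx_modify_nil l_wk i _ (by simp) hE, hE]
    · -- there is an empty pile
      obtain ⟨i, rest', hE'⟩ : ∃ i rest', eIdx l_wk = i :: rest' := by
        cases h : eIdx l_wk with
        | nil => exact absurd h hE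
        | cons a b => exact ⟨a, b, rfl⟩
      have hmem : ([] : List Int) ∈ l_wk := by
        by_contra hh
        exact hE ((eIdx_nil_iff l_wk).mpr hh)
      have helt : e < empties.length := by
        rw [hE'] at hdlen; simp at hdlen; omega
      rw [if_pos helt]
      obtain ⟨hilt, hidx⟩ := eIdx_head l_wk i rest' hE'
      have hget : empties.getD e 0 = i := by
        rw [List.getD_eq_getElem?_getD, ← List.head?_drop, hemp, hE']
        rfl
      have hAstep : sepA_step (l_wk, l_sobra) carga = (l_wk.modify i (· ++ [carga]), l_sobra) := by
        rw [sepA_step, if_pos (by simp [wookie_vazio, hmem])]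
        simp only [hidx]
      cases tree with
      | none =>
        exact absurd ((eIdx_nil_iff l_wk).mpr (by rw [htree]; simp)) hE
      | some t =>
        obtain ⟨hwne, hv, ht⟩ := htree
        have hilt' : i < t.toList.length := by rw [ht]; simpa using hilt
        obtain ⟨hv', ht', _⟩ := stUpdate_spec t i carga hv hilt'
        rw [hAstep, hget]
        simp only [Option.map_some]
        apply ih
        · refine ⟨?_, hv', ?_⟩
          · have hlm : (l_wk.modify i (· ++ [carga])).length = l_wk.length := by simp
            intro hh
            rw [hh] at hlm
            simp at hlm
            omega
          · rw [ht', ht, tops_modify l_wk i carga hilt]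
        · rw [← List.tail_drop, hemp, hE', eIdx_modify_head l_wk i rest' _ (by simp) hE']
          rfl

-- ===== VERDICT (by name: the statement is the Claim_ definition above) =====
theorem separa_carga_spec : Claim_equal_separa_carga := by
  intro l_wk l_sobra l_carga _
  unfold Spec_separa_carga separa_carga separa_carga_alt
  have htops : l_wk.map (fun wk => if wk = [] then (0 : Int) else wk.getLastD 0) = l_wk.map pileTop :=
    List.map_congr_left (fun wk _ => pileTop_if wk)
  simp only [htops]
  have hemp0 : (sepB_empties l_wk 0).drop 0 = eIdx l_wk := by
    rw [List.drop_zero, sepB_empties_eq]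
    simp
  by_cases h : l_wk = []
  · subst h
    rw [if_pos (by simp)]
    exact go_main l_carga [] l_sobra none (sepB_empties [] 0) 0 rfl hemp0
  · have hne : l_wk.map pileTop ≠ [] := by simpa using h
    rw [if_neg hne]
    obtain ⟨hv, ht, _⟩ := stBuild_spec (l_wk.map pileTop) hne
    exact go_main l_carga l_wk l_sobra (some (stBuild (l_wk.map pileTop))) (sepB_empties l_wk 0) 0
      ⟨h, hv, ht⟩ hemp0
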